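-- pv_equiv track=rewrite | github.com/ytixu/haiku-scraper | converter/utils/utils.py | make_combos
-- ===== SOURCE A (Python) =====
-- import copy
--
-- def make_combos(topics, lines, combos=[[]], words=[[]]):
-- 	if len(topics) == 0:
-- 		return combos
--
-- 	new_combos = []
-- 	new_words = []
-- 	for i, combo in enumerate(combos):
-- 		for topic in topics[0]:
-- 			if topic not in words:
-- 				new_combos.append(copy.copy(combo) + [(topic,lines[0])])
-- 				new_words.append(copy.copy(words[i]) + [topic])
--
-- 	return make_combos(topics[1:], lines[1:], new_combos, new_words)
-- ===== SOURCE B (Python) =====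
-- def make_combos(topics, lines, combos=[[]], words=[[]]):
-- 	# Iterative rebuild: the guard `topic not in words` in the original is always
-- 	# true (a str never equals a list of str), so the words bookkeeping never
-- 	# affects the result and is dropped.
-- 	result = combos
-- 	for i, level in enumerate(topics):
-- 		result = [combo + [(topic, lines[i])] for combo in result for topic in level]
-- 		if not result:
-- 			break
-- 	return result
-- ===== Notes on version B (the rewrite author's own statement) =====
-- stated objective: simpler
-- what changed: Replaces the linear recursion that threads combos/words through recursive calls by a single iterative loop that rebuilds the combo list per level with a flat comprehension, dropping the `topic not in words` guard (always true: a str never equals a list of str) and the words bookkeeping entirely, and breaking early once the combo list is empty.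
import Mathlib
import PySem

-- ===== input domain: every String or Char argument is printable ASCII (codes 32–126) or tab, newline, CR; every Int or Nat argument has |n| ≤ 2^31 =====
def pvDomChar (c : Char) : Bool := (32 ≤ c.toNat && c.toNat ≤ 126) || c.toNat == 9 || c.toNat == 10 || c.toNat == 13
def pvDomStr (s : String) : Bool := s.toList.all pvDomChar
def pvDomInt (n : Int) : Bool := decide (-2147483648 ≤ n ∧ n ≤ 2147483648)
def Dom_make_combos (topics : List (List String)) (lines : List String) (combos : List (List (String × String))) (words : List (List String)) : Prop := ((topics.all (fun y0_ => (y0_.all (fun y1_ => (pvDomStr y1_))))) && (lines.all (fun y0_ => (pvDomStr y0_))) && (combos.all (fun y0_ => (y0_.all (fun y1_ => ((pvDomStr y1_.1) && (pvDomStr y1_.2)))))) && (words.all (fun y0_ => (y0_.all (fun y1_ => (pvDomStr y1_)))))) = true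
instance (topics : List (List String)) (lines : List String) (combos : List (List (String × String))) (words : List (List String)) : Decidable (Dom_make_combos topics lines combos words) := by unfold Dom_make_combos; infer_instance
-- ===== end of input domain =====

-- B replaces A's linear recursion (which threads combos/words pairs through recursive
-- calls and re-tests the always-true guard `topic not in words`) by one iterative loop
-- that rebuilds the combo list per level and drops the words bookkeeping: simpler.


-- ===== PORT A =====
-- Python's `topic in words` compares a str against each element of words (a list of
-- lists of str); `str == list` is always False in Python, so this is exact:
def pyStrEqListStr (_t : String) (_w : List String) : Bool := false

-- one step of A's inner `for topic in topics[0]:` loop over the accumulator pair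
def aInner (line0 : String) (words : List (List String)) (i : Int)
    (combo : List (String × String)) (t0 : List String)
    (acc : List (List (String × String)) × List (List String)) :
    List (List (String × String)) × List (List String) :=
  t0.foldl (fun acc topic =>
    if words.any (fun w => pyStrEqListStr topic w) then acc
    else (acc.1 ++ [combo ++ [(topic, line0)]],
          acc.2 ++ [((PySem.List.pyGet? words i).getD []) ++ [topic]])) acc

def make_combos (topics : List (List String)) (lines : List String) (combos : List (List (String × String))) (words : List (List String)) : List (List (String × String)) :=
  match topics with
  | [] => combos
  | t0 :: rest =>
    -- lines[0]: totalized with getD; Pre_ excludes the inputs where Python raises here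
    let line0 := (PySem.List.pyGet? lines 0).getD ""
    let p := (PySem.List.enumerate combos).foldl
      (fun acc ic => aInner line0 words ic.1 ic.2 t0 acc) ([], [])
    make_combos rest (lines.drop 1) p.1 p.2

-- ===== PORT B =====
-- `for i, level in enumerate(topics):` with the rebuild comprehension and early break
def bLoop (lines : List String) : Nat → List (List String) → List (List (String × String)) → List (List (String × String))
  | _, [], result => result
  | i, level :: rest, result =>
    let result' := result.flatMap (fun combo =>
      level.map (fun topic => combo ++ [(topic, (PySem.List.pyGet? lines (Int.ofNat i)).getD "")]))
    if result'.isEmpty then result' else bLoop lines (i + 1) rest result'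

def make_combos_alt (topics : List (List String)) (lines : List String) (combos : List (List (String × String))) (words : List (List String)) : List (List (String × String)) :=
  bLoop lines 0 topics combos

-- ===== PRECONDITION & SPEC =====
-- Pre_ excludes exactly the inputs on which Python A raises IndexError: with a nonempty
-- combos list, A reads lines[0] at each of the first (topics.takeWhile (· ≠ [])).length
-- levels, and words[i] for every i < combos.length at the first level when it is nonempty.
def Pre_make_combos (topics : List (List String)) (lines : List String) (combos : List (List (String × String))) (words : List (List String)) : Prop :=
  combos = [] ∨
    ((topics.takeWhile (fun l => !l.isEmpty)).length ≤ lines.length ∧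
     ((topics.takeWhile (fun l => !l.isEmpty)).length = 0 ∨ combos.length ≤ words.length))
instance (topics : List (List String)) (lines : List String) (combos : List (List (String × String))) (words : List (List String)) : Decidable (Pre_make_combos topics lines combos words) := by unfold Pre_make_combos; infer_instance

def pvWitness_make_combos : List (List String) × List String × (List (List (String × String))) × List (List String) :=
  ([["a"], ["b", "c"]], ["l1", "l2"], [[]], [[]])

def Spec_make_combos (topics : List (List String)) (lines : List String) (combos : List (List (String × String))) (words : List (List String)) (out : List (List (String × String))) : Prop := out = make_combos_alt topics lines combos words
instance (topics : List (List String)) (lines : List String) (combos : List (List (String × String))) (words : List (List String)) (out : List (List (String × String))) : Decidable (Spec_make_combos topics lines combos words out) := by unfold Spec_make_combos; infer_instance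

-- ===== CLAIM (what is proved, stated in full; the proofs are below) =====
def Claim_equal_make_combos : Prop := ∀ (topics : List (List String)) (lines : List String) (combos : List (List (String × String))) (words : List (List String)), Dom_make_combos topics lines combos words → Pre_make_combos topics lines combos words → Spec_make_combos topics lines combos words (make_combos topics lines combos words)

-- ===== LEMMAS AND PROOFS =====

-- A's inner loop appends one combo and one word list per topic of t0
theorem aInner_eq (line0 : String) (words : List (List String)) (i : Int)
    (combo : List (String × String)) (t0 : List String)
    (acc : List (List (String × String)) × List (List String)) :
    aInner line0 words i combo t0 acc =
      (acc.1 ++ t0.map (fun topic => combo ++ [(topic, line0)]),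
       acc.2 ++ t0.map (fun topic => ((PySem.List.pyGet? words i).getD []) ++ [topic])) := by
  unfold aInner
  induction t0 generalizing acc with
  | nil => simp
  | cons t ts ih =>
    rw [List.foldl_cons, ih]
    simp [pyStrEqListStr]

-- A's outer loop over enumerate combos, as a pair of flatMaps
theorem aOuter_eq (line0 : String) (words : List (List String)) (t0 : List String)
    (l : List (Int × List (String × String)))
    (acc : List (List (String × String)) × List (List String)) :
    l.foldl (fun acc ic => aInner line0 words ic.1 ic.2 t0 acc) acc =
      (acc.1 ++ l.flatMap (fun ic => t0.map (fun topic => ic.2 ++ [(topic, line0)])),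
       acc.2 ++ l.flatMap (fun ic => t0.map (fun topic => ((PySem.List.pyGet? words ic.1).getD []) ++ [topic]))) := by
  induction l generalizing acc with
  | nil => simp
  | cons ic l ih =>
    rw [List.foldl_cons, ih, aInner_eq]
    simp

-- flatMapping a function of the element only over enumerate forgets the indices
theorem flatMap_enumerate {α β : Type} (l : List α) (s : Int) (F : α → List β) :
    (PySem.List.enumerate l s).flatMap (fun ic => F ic.2) = l.flatMap F := by
  induction l generalizing s with
  | nil => simp [PySem.List.enumerate_nil]
  | cons x xs ih => simp [PySem.List.enumerate_cons, ih]

theorem make_combos_combos_nil (topics : List (List String)) (lines : List String)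
    (words : List (List String)) : make_combos topics lines [] words = [] := by
  induction topics generalizing lines words with
  | nil => simp [make_combos]
  | cons t0 rest ih => simp [make_combos, PySem.List.enumerate_nil, ih]

theorem main_eq (topics : List (List String)) (lines : List String)
    (k : Nat) (combos : List (List (String × String))) (words : List (List String)) :
    make_combos topics (lines.drop k) combos words = bLoop lines k topics combos := by
  induction topics generalizing k combos words with
  | nil => simp [make_combos, bLoop]
  | cons t0 rest ih =>
    have hline : (PySem.List.pyGet? (lines.drop k) 0).getD "" =
        (PySem.List.pyGet? lines (Int.ofNat k)).getD "" := by
      simp [PySem.List.pyGet?_zero, Int.ofNat_eq_natCast, List.getElem?_drop]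
    rw [make_combos]
    simp only [aOuter_eq, List.nil_append, hline]
    rw [flatMap_enumerate combos 0
      (fun combo => t0.map (fun topic => combo ++ [(topic, (PySem.List.pyGet? lines (Int.ofNat k)).getD "")]))]
    rw [bLoop]
    by_cases hE : (combos.flatMap (fun combo =>
        t0.map (fun topic => combo ++ [(topic, (PySem.List.pyGet? lines (Int.ofNat k)).getD "")]))) = []
    · rw [hE]
      simp only [List.isEmpty_nil, if_true]
      simpa using make_combos_combos_nil rest (lines.drop (k + 1)) _
    · rw [if_neg (by simpa [List.isEmpty_iff] using hE)]
      have := ih (k := k + 1)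
        (combos := combos.flatMap (fun combo =>
          t0.map (fun topic => combo ++ [(topic, (PySem.List.pyGet? lines (Int.ofNat k)).getD "")])))
        (words := (PySem.List.enumerate combos).flatMap
          (fun ic => t0.map (fun topic => ((PySem.List.pyGet? words ic.1).getD []) ++ [topic])))
      simpa [List.drop_drop, Nat.add_comm] using this

-- ===== VERDICT (by name: the statement is the Claim_ definition above) =====
theorem make_combos_spec : Claim_equal_make_combos := by
  intro topics lines combos words _ _
  unfold Spec_make_combos make_combos_alt
  simpa using main_eq topics lines 0 combos words
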